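-- pv_equiv track=rewrite | github.com/leeyjeen/TIL | problem-solving/programmers/level02/기능개발.py | solution
-- ===== SOURCE A (Python) =====
-- import math
--
-- def solution(progresses, speeds):
--     wait = []
--     deploy = []
--
--     for i, (a,b) in enumerate(zip(progresses, speeds)):
--         if i > 0 and math.ceil((100-a)/b) < wait[i-1]:
--             wait.append(wait[i-1])
--         else:
--             wait.append(math.ceil((100-a)/b))
--
--     for i in range(0, len(wait)):
--         if i == 0:
--             deploy.append(1)
--         else:
--             if wait[i-1] == wait[i]:
--                 deploy[-1] += 1
--             else:
--                 deploy.append(1)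
--     return deploy
-- ===== SOURCE B (Python) =====
-- import math
--
-- def solution(progresses, speeds):
--     result = []
--     front = 0
--     count = 0
--     for a, b in zip(progresses, speeds):
--         d = math.ceil((100 - a) / b)
--         if count > 0 and d <= front:
--             count += 1
--         else:
--             if count > 0:
--                 result.append(count)
--             front = d
--             count = 1
--     if count > 0:
--         result.append(count)
--     return result
-- ===== Notes on version B (the rewrite author's own statement) =====
-- stated objective: simpler
-- what changed: B replaces A's two passes (build a running-max 'wait' list, then run-length-encode it) with a single pass over zip(progresses, speeds) maintaining only the current batch front day and count.
import Mathlib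
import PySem

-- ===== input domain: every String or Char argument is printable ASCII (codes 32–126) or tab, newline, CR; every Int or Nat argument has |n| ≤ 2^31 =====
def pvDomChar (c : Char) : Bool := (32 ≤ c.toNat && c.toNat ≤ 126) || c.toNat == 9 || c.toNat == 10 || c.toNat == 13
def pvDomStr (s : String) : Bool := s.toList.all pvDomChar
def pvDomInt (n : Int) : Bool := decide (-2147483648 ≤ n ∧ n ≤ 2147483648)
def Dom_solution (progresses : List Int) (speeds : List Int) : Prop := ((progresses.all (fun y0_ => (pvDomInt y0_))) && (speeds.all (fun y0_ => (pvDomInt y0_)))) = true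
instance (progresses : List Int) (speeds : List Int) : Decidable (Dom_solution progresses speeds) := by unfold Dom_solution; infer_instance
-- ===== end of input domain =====

-- B simplifies A's two passes (running-max list, then run-length encode) into one pass
-- keeping only the current batch's front day and count.

-- math.ceil((100-a)/b): on the stated domain (|ints| ≤ 2^31, b ≠ 0) Python's float
-- division is exact enough that math.ceil of it equals the exact ceiling -((-n)//b).
def pyCeilDiv (n : Int) (b : Int) : Int := -(PySem.Int.floordiv (-n) b)

-- ===== PORT A =====
-- first loop: wait.append(wait[i-1]) / wait.append(d); wait[i-1] is the element
-- appended by the previous iteration, carried here as 'prev'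
def waitLoopA (l : List (Int × Int)) (prev : Int) : List Int :=
  match l with
  | [] => []
  | (a, b) :: rest =>
      let d := pyCeilDiv (100 - a) b
      let w := if d < prev then prev else d
      w :: waitLoopA rest w

-- second loop: i == 0 appends 1; afterwards compares wait[i-1] ('prev') with wait[i],
-- deploy[-1] += 1 becomes dropLast ++ [last + 1]
def deployLoopA (prev : Int) (ws : List Int) (deploy : List Int) : List Int :=
  match ws with
  | [] => deploy
  | w :: rest =>
      if prev == w then deployLoopA w rest (deploy.dropLast ++ [deploy.getLastD 0 + 1])
      else deployLoopA w rest (deploy ++ [1])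

def solution (progresses : List Int) (speeds : List Int) : List Int :=
  match progresses.zip speeds with
  | [] => []
  | (a, b) :: rest =>
      let d := pyCeilDiv (100 - a) b
      let wait := d :: waitLoopA rest d
      match wait with
      | [] => []
      | w :: ws => deployLoopA w ws [1]

-- ===== PORT B =====
def loopB (l : List (Int × Int)) (front : Int) (count : Int) (result : List Int) : List Int :=
  match l with
  | [] => if count > 0 then result ++ [count] else result
  | (a, b) :: rest =>
      let d := pyCeilDiv (100 - a) b
      if count > 0 ∧ d ≤ front then loopB rest front (count + 1) result
      else loopB rest d 1 (if count > 0 then result ++ [count] else result)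

def solution_alt (progresses : List Int) (speeds : List Int) : List Int :=
  loopB (progresses.zip speeds) 0 0 []

-- ===== PRECONDITION & SPEC =====
-- Pre_ excludes exactly the inputs where Python A raises ZeroDivisionError:
-- a zero speed inside the zipped prefix (B raises there too).
def Pre_solution (progresses : List Int) (speeds : List Int) : Prop :=
  ∀ x ∈ speeds.take progresses.length, x ≠ 0

instance (progresses : List Int) (speeds : List Int) : Decidable (Pre_solution progresses speeds) := by unfold Pre_solution; infer_instance

def pvWitness_solution : List Int × List Int := ([93, 30, 55], [1, 30, 5])

def Spec_solution (progresses : List Int) (speeds : List Int) (out : List Int) : Prop := out = solution_alt progresses speeds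
instance (progresses : List Int) (speeds : List Int) (out : List Int) : Decidable (Spec_solution progresses speeds out) := by unfold Spec_solution; infer_instance

-- ===== CLAIM (what is proved, stated in full; the proofs are below) =====
def Claim_equal_solution : Prop := ∀ (progresses : List Int) (speeds : List Int), Dom_solution progresses speeds → Pre_solution progresses speeds → Spec_solution progresses speeds (solution progresses speeds)

-- ===== LEMMAS AND PROOFS =====

-- main invariant: A's second loop over the running-max list equals B's single pass,
-- with the current run carried as (res ++ [c]).
theorem deploy_eq_loopB (l : List (Int × Int)) (prev c : Int) (res : List Int)
    (hc : 0 < c) :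
    deployLoopA prev (waitLoopA l prev) (res ++ [c]) = loopB l prev c res := by
  induction l generalizing prev c res with
  | nil =>
      simp [waitLoopA, deployLoopA, loopB, hc]
  | cons hd tl ih =>
      obtain ⟨a, b⟩ := hd
      simp only [waitLoopA, loopB]
      by_cases hle : pyCeilDiv (100 - a) b ≤ prev
      · have hw : (if pyCeilDiv (100 - a) b < prev then prev else pyCeilDiv (100 - a) b) = prev := by
          rcases lt_or_eq_of_le hle with h | h
          · simp [h]
          · simp [h]
        rw [hw]
        simp only [deployLoopA, beq_self_eq_true, if_true]
        have : (res ++ [c]).dropLast ++ [(res ++ [c]).getLastD 0 + 1] = res ++ [c + 1] := by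
          simp
        rw [this, ih prev (c + 1) res (by omega)]
        simp [hc, hle]
      · have hlt : prev < pyCeilDiv (100 - a) b := by omega
        have hw : (if pyCeilDiv (100 - a) b < prev then prev else pyCeilDiv (100 - a) b) = pyCeilDiv (100 - a) b := by
          simp [not_lt_of_gt hlt]
        rw [hw]
        simp only [deployLoopA]
        have hne : (prev == pyCeilDiv (100 - a) b) = false := by
          simp [ne_of_lt hlt]
        rw [hne]
        simp only [Bool.false_eq_true, if_false]
        rw [ih (pyCeilDiv (100 - a) b) 1 (res ++ [c]) (by omega)]
        simp [hc, hle]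

-- ===== VERDICT (by name: the statement is the Claim_ definition above) =====
theorem solution_spec : Claim_equal_solution := by
  intro progresses speeds _ _
  unfold Spec_solution solution solution_alt
  cases h : progresses.zip speeds with
  | nil => simp [loopB]
  | cons hd tl =>
      obtain ⟨a, b⟩ := hd
      simp only [loopB]
      have h01 : ¬ ((0 : Int) > 0 ∧ pyCeilDiv (100 - a) b ≤ 0) := by
        intro ⟨h1, _⟩; omega
      rw [if_neg h01]
      simp only [show ¬ (0:Int) > 0 by omega, if_false]
      have := deploy_eq_loopB tl (pyCeilDiv (100 - a) b) 1 [] (by omega)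
      simpa using this
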